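-- pv_equiv track=rewrite | github.com/Aditya-1301/Advent-of-Code | AoC 2021/Python Solutions/day6/day6.py | decrement2
-- ===== SOURCE A (Python) =====
-- def decrement2(map):
--     map1 = dict()
--     for k, v in map.items():
--         if k == 0:
--             x = map1.get(6, 0)
--             map1.update({6: v+x})
--         else:
--             x = map1.get(k-1, 0)
--             map1.update({k-1: v+x})
--     return map1
-- ===== SOURCE B (Python) =====
-- def decrement2(map):
--     # merged value for key 6: everything that had timer 0 wraps to 6 and joins old timer-7 fish
--     merged = map.get(0, 0) + map.get(7, 0)
--     return {(6 if k in (0, 7) else k - 1): (merged if k in (0, 7) else v)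
--             for k, v in map.items()}
-- ===== Notes on version B (the rewrite author's own statement) =====
-- stated objective: simpler
-- what changed: A accumulates into a fresh dict with a get-then-update per item; B precomputes the one merged value for key 6 (map.get(0,0)+map.get(7,0), the only possible collision) and then builds the result in a single collision-free dict comprehension with no accumulation.
import Mathlib
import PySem

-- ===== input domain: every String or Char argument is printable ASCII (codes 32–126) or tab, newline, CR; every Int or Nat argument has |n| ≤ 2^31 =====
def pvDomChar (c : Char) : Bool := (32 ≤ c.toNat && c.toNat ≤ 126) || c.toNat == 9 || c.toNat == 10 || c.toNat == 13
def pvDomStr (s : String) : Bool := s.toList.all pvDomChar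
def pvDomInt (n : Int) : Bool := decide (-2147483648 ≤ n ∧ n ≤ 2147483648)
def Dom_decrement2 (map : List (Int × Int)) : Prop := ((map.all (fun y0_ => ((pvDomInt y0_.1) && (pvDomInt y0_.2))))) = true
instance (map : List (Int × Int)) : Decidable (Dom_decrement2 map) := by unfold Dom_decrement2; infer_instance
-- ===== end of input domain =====

-- B replaces A's accumulate-as-you-go dict loop by a precomputed merged value for the
-- wrapped key 6 plus a single collision-free mapping pass (objective: simpler).

-- ===== PORT A =====
def decrement2 (map : List (Int × Int)) : List (Int × Int) :=
  (map.foldl (fun (map1 : PySem.Dict Int Int) kv =>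
      if kv.1 == 0 then
        let x := map1.getD 6 0
        map1.insert 6 (kv.2 + x)
      else
        let x := map1.getD (kv.1 - 1) 0
        map1.insert (kv.1 - 1) (kv.2 + x))
    PySem.Dict.empty).items

-- ===== PORT B =====
def decrement2_alt (map : List (Int × Int)) : List (Int × Int) :=
  let merged := (PySem.Dict.mk map).getD 0 0 + (PySem.Dict.mk map).getD 7 0
  (map.foldl (fun (r : PySem.Dict Int Int) kv =>
      r.insert (if kv.1 == 0 || kv.1 == 7 then 6 else kv.1 - 1)
               (if kv.1 == 0 || kv.1 == 7 then merged else kv.2))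
    PySem.Dict.empty).items

-- ===== PRECONDITION & SPEC =====
-- Pre_ excludes association lists with duplicate keys: they do not represent a Python dict
-- (A's parameter is a dict, whose keys are unique), so any behaviour there is accidental.
def Pre_decrement2 (map : List (Int × Int)) : Prop := (map.map Prod.fst).Nodup
instance (map : List (Int × Int)) : Decidable (Pre_decrement2 map) := by unfold Pre_decrement2; infer_instance
def pvWitness_decrement2 : (List (Int × Int)) := [(0, 3), (2, 5), (7, 1)]
def Spec_decrement2 (map : List (Int × Int)) (out : List (Int × Int)) : Prop := out = decrement2_alt map
instance (map : List (Int × Int)) (out : List (Int × Int)) : Decidable (Spec_decrement2 map out) := by unfold Spec_decrement2; infer_instance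

-- ===== CLAIM (what is proved, stated in full; the proofs are below) =====
def Claim_equal_decrement2 : Prop := ∀ (map : List (Int × Int)), Dom_decrement2 map → Pre_decrement2 map → Spec_decrement2 map (decrement2 map)

-- ===== LEMMAS AND PROOFS =====

-- A's loop body, named for the proofs (definitionally the fold function of the port of A)
def stepA (d : PySem.Dict Int Int) (kv : Int × Int) : PySem.Dict Int Int :=
  if kv.1 == 0 then d.insert 6 (kv.2 + d.getD 6 0)
  else d.insert (kv.1 - 1) (kv.2 + d.getD (kv.1 - 1) 0)

-- B's loop body
def stepB (m : Int) (d : PySem.Dict Int Int) (kv : Int × Int) : PySem.Dict Int Int :=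
  d.insert (if kv.1 == 0 || kv.1 == 7 then 6 else kv.1 - 1)
           (if kv.1 == 0 || kv.1 == 7 then m else kv.2)

-- total value carried by keys 0 and 7 (everything that ends up at key 6)
def sum07 (l : List (Int × Int)) : Int :=
  ((l.filter (fun kv => kv.1 == 0 || kv.1 == 7)).map Prod.snd).sum

lemma decrement2_eq_fold (map : List (Int × Int)) :
    decrement2 map = (map.foldl stepA PySem.Dict.empty).items := rfl

lemma decrement2_alt_eq_fold (map : List (Int × Int)) :
    decrement2_alt map =
      (map.foldl (stepB ((PySem.Dict.mk map).getD 0 0 + (PySem.Dict.mk map).getD 7 0))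
        PySem.Dict.empty).items := rfl

-- re-inserting a key with its current value is the identity (keys unique)
lemma insert_self_value (d : PySem.Dict Int Int) (k : Int)
    (hnd : d.keys.Nodup) (hk : k ∈ d.keys) :
    d.insert k (d.getD k 0) = d := by
  have hc : d.contains k = true := (PySem.Dict.contains_iff_mem_keys _ _).2 hk
  apply PySem.Dict.ext
  rw [PySem.Dict.items_insert_of_contains _ _ hc]
  have : ∀ p ∈ d.items, (if p.1 == k then ((k : Int), d.getD k 0) else p) = p := by
    intro p hp
    by_cases h : p.1 = k
    · simp only [h, BEq.rfl, if_true]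
      have hmem : (k, p.2) ∈ d.items := by
        have : p = (k, p.2) := by cases p; simp_all
        rwa [this] at hp
      have := PySem.Dict.getD_of_mem_items d hmem hnd 0
      rw [this]
      cases p; simp_all
    · simp [h]
  calc d.items.map (fun p => if p.1 == k then ((k : Int), d.getD k 0) else p)
      = d.items.map id := List.map_congr_left this
    _ = d.items := List.map_id d.items

lemma sum07_cons (kv : Int × Int) (l : List (Int × Int)) :
    sum07 (kv :: l) = (if kv.1 = 0 ∨ kv.1 = 7 then kv.2 else 0) + sum07 l := by
  by_cases h : kv.1 = 0 ∨ kv.1 = 7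
  · have : (kv.1 == 0 || kv.1 == 7) = true := by
      rcases h with h | h <;> simp [h]
    simp [sum07, List.filter_cons, this, h]
  · have : (kv.1 == 0 || kv.1 == 7) = false := by
      push_neg at h; simp [h.1, h.2]
    simp [sum07, List.filter_cons, this, h]

lemma getD_mk_cons (kv : Int × Int) (rest : List (Int × Int)) (j : Int) :
    (PySem.Dict.mk (kv :: rest)).getD j 0 =
      if kv.1 = j then kv.2 else (PySem.Dict.mk rest).getD j 0 := by
  rw [PySem.Dict.getD_eq_get?_getD, PySem.Dict.get?_mk_cons]
  by_cases h : kv.1 = j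
  · simp [h]
  · simp [h, PySem.Dict.getD_eq_get?_getD]

lemma getD_not_mem (d : PySem.Dict Int Int) (j : Int) (h : j ∉ d.keys) :
    d.getD j 0 = 0 := by
  apply PySem.Dict.getD_of_not_contains
  simp [← Bool.not_eq_true, PySem.Dict.contains_iff_mem_keys, h]

-- the merged value B precomputes is exactly the total wrapped into key 6
lemma sum07_eq_getD (map : List (Int × Int)) (h : (map.map Prod.fst).Nodup) :
    sum07 map = (PySem.Dict.mk map).getD 0 0 + (PySem.Dict.mk map).getD 7 0 := by
  induction map with
  | nil => decide
  | cons kv rest ih =>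
    have hrest : (rest.map Prod.fst).Nodup := (List.nodup_cons.mp h).2
    have hni : kv.1 ∉ rest.map Prod.fst := (List.nodup_cons.mp h).1
    have hkeys : (PySem.Dict.mk rest).keys = rest.map Prod.fst := by
      simp [PySem.Dict.keys_mk]
    rw [sum07_cons, ih hrest, getD_mk_cons, getD_mk_cons]
    by_cases h0 : kv.1 = 0
    · have h7 : ¬ kv.1 = 7 := by omega
      have hz : (PySem.Dict.mk rest).getD 0 0 = 0 := by
        apply getD_not_mem; rw [hkeys, ← h0]; exact hni
      rw [if_pos (Or.inl h0), if_pos h0, if_neg h7, hz]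
      ring
    · by_cases h7 : kv.1 = 7
      · have hz : (PySem.Dict.mk rest).getD 7 0 = 0 := by
          apply getD_not_mem; rw [hkeys, ← h7]; exact hni
        rw [if_pos (Or.inr h7), if_neg h0, if_pos h7, hz]
        ring
      · rw [if_neg (by tauto), if_neg h0, if_neg h7]
        ring

-- two inserts at distinct keys commute AS LISTS when the first key is present and the second fresh
lemma insert_fresh_comm (d : PySem.Dict Int Int) (k j : Int) (v w : Int)
    (hk : k ∈ d.keys) (hj : j ∉ d.keys) (hne : j ≠ k) :
    (d.insert k v).insert j w = (d.insert j w).insert k v := by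
  have hck : d.contains k = true := (PySem.Dict.contains_iff_mem_keys _ _).2 hk
  have hcj : d.contains j = false := by
    simp [← Bool.not_eq_true, PySem.Dict.contains_iff_mem_keys, hj]
  apply PySem.Dict.ext
  have h1 : (d.insert k v).contains j = false := by
    rw [PySem.Dict.contains_insert]
    simp [hne, hcj]
  have h2 : (d.insert j w).contains k = true := by
    rw [PySem.Dict.contains_insert]
    simp [hck]
  rw [PySem.Dict.items_insert_of_not_contains _ _ h1,
      PySem.Dict.items_insert_of_contains _ _ hck,
      PySem.Dict.items_insert_of_contains _ _ h2,
      PySem.Dict.items_insert_of_not_contains _ _ hcj,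
      List.map_append]
  simp [hne]

-- main invariant: running A's loop and B's loop in lockstep gives the same dict
lemma main_inv (l : List (Int × Int)) (m : Int) (dA dB : PySem.Dict Int Int)
    (hnod : dA.keys.Nodup)
    (hl : (l.map Prod.fst).Nodup)
    (hfresh : ∀ kv ∈ l, ¬(kv.1 = 0 ∨ kv.1 = 7) → (kv.1 - 1) ∉ dA.keys)
    (hcase : ((6 : Int) ∉ dA.keys ∧ dB = dA ∧ sum07 l = m)
           ∨ ((6 : Int) ∈ dA.keys ∧ dB = dA.insert 6 m ∧ dA.getD 6 0 + sum07 l = m)) :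
    l.foldl stepA dA = l.foldl (stepB m) dB := by
  induction l generalizing dA dB with
  | nil =>
    simp only [List.foldl_nil]
    rcases hcase with ⟨_, hdb, _⟩ | ⟨h6, hdb, hm⟩
    · exact hdb.symm
    · have : m = dA.getD 6 0 := by
        have := hm; simp [sum07] at this; omega
      rw [hdb, this, insert_self_value dA 6 hnod h6]
  | cons kv rest ih =>
    have hlrest : (rest.map Prod.fst).Nodup := (List.nodup_cons.mp hl).2
    have hlni : kv.1 ∉ rest.map Prod.fst := (List.nodup_cons.mp hl).1
    simp only [List.foldl_cons]
    by_cases h07 : kv.1 = 0 ∨ kv.1 = 7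
    · -- this fish wraps to key 6
      have hb : (kv.1 == 0 || kv.1 == 7) = true := by
        rcases h07 with h | h <;> simp [h]
      have hA : stepA dA kv = dA.insert 6 (kv.2 + dA.getD 6 0) := by
        rcases h07 with h | h
        · simp [stepA, h]
        · have : kv.1 - 1 = 6 := by omega
          have h0 : (kv.1 == 0) = false := by simp; omega
          simp [stepA, h0, this]
      have hB : stepB m dB kv = dB.insert 6 m := by simp [stepB, hb]
      rw [hA, hB]
      rcases hcase with ⟨h6, hdb, hm⟩ | ⟨h6, hdb, hm⟩
      · -- first wrapped fish: key 6 appears now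
        have hg : dA.getD 6 0 = 0 := getD_not_mem dA 6 h6
        apply ih (dA.insert 6 (kv.2 + dA.getD 6 0)) (dB.insert 6 m)
          (PySem.Dict.nodup_keys_insert _ _ _ hnod) hlrest
        · intro kv' hkv' hkv'07
          rw [PySem.Dict.mem_keys_insert]
          push_neg
          constructor
          · push_neg at hkv'07; omega
          · exact hfresh kv' (List.mem_cons_of_mem _ hkv') hkv'07
        · right
          refine ⟨by rw [PySem.Dict.mem_keys_insert]; left; rfl, ?_, ?_⟩
          · rw [hdb, PySem.Dict.insert_insert_self]
          · rw [PySem.Dict.getD_insert_self, hg]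
            rw [sum07_cons] at hm
            simp [h07] at hm
            omega
      · -- key 6 already present: accumulate
        apply ih (dA.insert 6 (kv.2 + dA.getD 6 0)) (dB.insert 6 m)
          (PySem.Dict.nodup_keys_insert _ _ _ hnod) hlrest
        · intro kv' hkv' hkv'07
          rw [PySem.Dict.mem_keys_insert]
          push_neg
          constructor
          · push_neg at hkv'07; omega
          · exact hfresh kv' (List.mem_cons_of_mem _ hkv') hkv'07
        · right
          refine ⟨by rw [PySem.Dict.mem_keys_insert]; left; rfl, ?_, ?_⟩
          · rw [hdb, PySem.Dict.insert_insert_self, PySem.Dict.insert_insert_self]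
          · rw [PySem.Dict.getD_insert_self]
            rw [sum07_cons] at hm
            simp [h07] at hm
            omega
    · -- ordinary fish: fresh target key kv.1 - 1 (≠ 6)
      have hb : (kv.1 == 0 || kv.1 == 7) = false := by
        push_neg at h07; simp [h07.1, h07.2]
      have h0 : (kv.1 == 0) = false := by push_neg at h07; simp [h07.1]
      have hfreshk : (kv.1 - 1) ∉ dA.keys := hfresh kv (by simp) h07
      have hg : dA.getD (kv.1 - 1) 0 = 0 := getD_not_mem dA _ hfreshk
      have hA : stepA dA kv = dA.insert (kv.1 - 1) kv.2 := by
        simp [stepA, h0, hg]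
      have hB : stepB m dB kv = dB.insert (kv.1 - 1) kv.2 := by simp [stepB, hb]
      rw [hA, hB]
      have hn6 : kv.1 - 1 ≠ 6 := by push_neg at h07; omega
      have hfresh' : ∀ kv' ∈ rest, ¬(kv'.1 = 0 ∨ kv'.1 = 7) →
          (kv'.1 - 1) ∉ (dA.insert (kv.1 - 1) kv.2).keys := by
        intro kv' hkv' hkv'07
        rw [PySem.Dict.mem_keys_insert]
        push_neg
        constructor
        · have : kv'.1 ≠ kv.1 := by
            intro hcon
            exact hlni (hcon ▸ List.mem_map_of_mem hkv')
          omega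
        · exact hfresh kv' (List.mem_cons_of_mem _ hkv') hkv'07
      rcases hcase with ⟨h6, hdb, hm⟩ | ⟨h6, hdb, hm⟩
      · apply ih (dA.insert (kv.1 - 1) kv.2) (dB.insert (kv.1 - 1) kv.2)
          (PySem.Dict.nodup_keys_insert _ _ _ hnod) hlrest hfresh'
        left
        refine ⟨?_, by rw [hdb], ?_⟩
        · rw [PySem.Dict.mem_keys_insert]
          push_neg
          exact ⟨Ne.symm hn6, h6⟩
        · rw [sum07_cons] at hm
          simp [h07] at hm
          omega
      · apply ih (dA.insert (kv.1 - 1) kv.2) (dB.insert (kv.1 - 1) kv.2)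
          (PySem.Dict.nodup_keys_insert _ _ _ hnod) hlrest hfresh'
        right
        refine ⟨?_, ?_, ?_⟩
        · rw [PySem.Dict.mem_keys_insert]; right; exact h6
        · rw [hdb, insert_fresh_comm dA 6 (kv.1 - 1) m kv.2 h6 hfreshk hn6]
        · rw [PySem.Dict.getD_insert_of_ne _ _ _ (Ne.symm hn6)]
          rw [sum07_cons] at hm
          simp [h07] at hm
          omega

-- ===== VERDICT (by name: the statement is the Claim_ definition above) =====
theorem decrement2_spec : Claim_equal_decrement2 := by
  intro map _ hpre
  unfold Spec_decrement2
  rw [decrement2_eq_fold, decrement2_alt_eq_fold]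
  congr 1
  apply main_inv
  · simp [PySem.Dict.keys_empty]
  · exact hpre
  · intro kv _ _
    simp [PySem.Dict.keys_empty]
  · left
    refine ⟨by simp [PySem.Dict.keys_empty], rfl, ?_⟩
    exact sum07_eq_getD map hpre
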